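-- pv_equiv track=rewrite | github.com/tensorflow/tensor2tensor | tensor2tensor/v2/t2t.py | _make_info
-- ===== SOURCE A (Python) =====
-- import collections
--
-- def _make_info(shape_list, num_classes):
--   """Create an info-like tuple for feature given some shapes and vocab size."""
--   feature_info = collections.namedtuple("FeatureInfo", ["shape", "num_classes"])
--   cur_shape = list(shape_list[0])
--   # We need to merge the provided shapes, put None where they disagree.
--   for shape in shape_list:
--     if len(shape) != len(cur_shape):
--       raise ValueError("Shapes need to have the same number of dimensions.")
--     for i in range(len(shape)):
--       if cur_shape[i] is not None:
--         if shape[i] != cur_shape[i]: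
--           cur_shape[i] = None
--   return feature_info(cur_shape, num_classes)
-- ===== SOURCE B (Python) =====
-- import collections
--
-- def _make_info(shape_list, num_classes):
--   """Create an info-like tuple for feature given some shapes and vocab size."""
--   feature_info = collections.namedtuple("FeatureInfo", ["shape", "num_classes"])
--   ndims = len(shape_list[0])
--   for shape in shape_list:
--     if len(shape) != ndims:
--       raise ValueError("Shapes need to have the same number of dimensions.")
--   merged = [col[0] if all(x == col[0] for x in col) else None
--             for col in zip(*shape_list)]
--   return feature_info(merged, num_classes)
-- ===== Notes on version B (the rewrite author's own statement) =====
-- stated objective: simpler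
-- what changed: Replaces the row-by-row in-place mutation of a running shape with a single per-dimension pass: transpose with zip(*) and emit the column's first value iff the whole column agrees on it, else None.
import Mathlib
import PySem

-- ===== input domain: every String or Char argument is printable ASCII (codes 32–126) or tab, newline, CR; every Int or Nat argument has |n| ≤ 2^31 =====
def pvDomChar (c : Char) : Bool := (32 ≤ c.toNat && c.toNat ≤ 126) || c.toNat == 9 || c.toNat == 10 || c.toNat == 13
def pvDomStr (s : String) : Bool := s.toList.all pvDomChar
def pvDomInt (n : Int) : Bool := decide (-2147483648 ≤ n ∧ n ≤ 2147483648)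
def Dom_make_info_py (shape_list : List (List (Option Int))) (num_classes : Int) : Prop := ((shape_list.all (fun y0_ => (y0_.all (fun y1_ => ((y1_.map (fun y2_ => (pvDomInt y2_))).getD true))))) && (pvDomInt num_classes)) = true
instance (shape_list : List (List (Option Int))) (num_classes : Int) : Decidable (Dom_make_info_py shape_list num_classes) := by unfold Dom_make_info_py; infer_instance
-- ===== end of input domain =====

-- B replaces A's row-by-row in-place mutation of a running shape with a single per-dimension
-- (column) aggregation pass over zip(*shape_list); return values only (A mutates no argument).

-- ===== PORT A =====
-- inner loop: 'for i in range(len(shape)): if cur_shape[i] is not None and shape[i] != cur_shape[i]: cur_shape[i] = None'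
def stepA (shape c : List (Option Int)) (i : Nat) : List (Option Int) :=
  match getElem? c i, getElem? shape i with
  | some (some v), some x => if x ≠ some v then c.set i none else c
  | _, _ => c

def mergeRowA (cur shape : List (Option Int)) : List (Option Int) :=
  (List.range shape.length).foldl (stepA shape) cur

-- A. The ValueError / IndexError paths (ragged rows, empty shape_list) are excluded by Pre_;
-- shape_list[0] is ported as headI.
def make_info_py (shape_list : List (List (Option Int))) (num_classes : Int) : List (Option Int) × Int :=
  let cur := shape_list.foldl (fun c shape => mergeRowA c shape) shape_list.headI
  (cur, num_classes)

-- ===== PORT B =====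
-- zip(*shape_list): column i of the rows, for i < len(shape_list[0]); exact under Pre_ (all rows same length).
def colB (shape_list : List (List (Option Int))) (i : Nat) : List (Option Int) :=
  shape_list.map (fun s => s.getD i none)

def make_info_py_alt (shape_list : List (List (Option Int))) (num_classes : Int) : List (Option Int) × Int :=
  let n := shape_list.headI.length
  let merged := (List.range n).map (fun i =>
    let col := colB shape_list i
    if col.all (fun x => x = col.headI) then col.headI else none)
  (merged, num_classes)

-- ===== PRECONDITION & SPEC =====
-- A raises IndexError on shape_list = [] and ValueError when rows have unequal lengths; exactly those inputs are excluded.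
def Pre_make_info_py (shape_list : List (List (Option Int))) (num_classes : Int) : Prop :=
  shape_list ≠ [] ∧ ∀ s ∈ shape_list, s.length = shape_list.headI.length
instance (shape_list : List (List (Option Int))) (num_classes : Int) : Decidable (Pre_make_info_py shape_list num_classes) := by unfold Pre_make_info_py; infer_instance

def pvWitness_make_info_py : List (List (Option Int)) × Int := ([[some 3, none], [some 3, some 5]], 10)

def Spec_make_info_py (shape_list : List (List (Option Int))) (num_classes : Int) (out : List (Option Int) × Int) : Prop := out = make_info_py_alt shape_list num_classes
instance (shape_list : List (List (Option Int))) (num_classes : Int) (out : List (Option Int) × Int) : Decidable (Spec_make_info_py shape_list num_classes out) := by unfold Spec_make_info_py; infer_instance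

-- ===== CLAIM (what is proved, stated in full; the proofs are below) =====
def Claim_equal_make_info_py : Prop := ∀ (shape_list : List (List (Option Int))) (num_classes : Int), Dom_make_info_py shape_list num_classes → Pre_make_info_py shape_list num_classes → Spec_make_info_py shape_list num_classes (make_info_py shape_list num_classes)

-- ===== LEMMAS AND PROOFS =====

-- pointwise merge of two cells, the effect of A's inner body at one index
def fcell (a b : Option Int) : Option Int :=
  match a with
  | none => none
  | some v => if b = some v then some v else none

-- the inner index loop is the pointwise zipWith of fcell (lengths equal)
theorem mergeRowA_prefix (cur shape : List (Option Int)) (hl : cur.length = shape.length)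
    (k : Nat) (hk : k ≤ shape.length) :
    (List.range k).foldl (stepA shape) cur
    = List.zipWith fcell (cur.take k) (shape.take k) ++ cur.drop k := by
  induction k with
  | zero => simp
  | succ k ih =>
    have hk' : k ≤ shape.length := Nat.le_of_succ_le hk
    have hks : k < shape.length := hk
    have hkc : k < cur.length := by omega
    rw [List.range_succ, List.foldl_append, ih hk']
    have hlen : (List.zipWith fcell (cur.take k) (shape.take k)).length = k := by
      simp [List.length_zipWith]; omega
    have hget : (List.zipWith fcell (cur.take k) (shape.take k) ++ cur.drop k)[k]? = some cur[k] := by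
      rw [List.getElem?_append_right (by omega)]
      rw [hlen]
      simp [hkc]
    have hdrop : cur.drop k = cur[k] :: cur.drop (k + 1) := List.drop_eq_getElem_cons hkc
    have htakec : cur.take (k+1) = cur.take k ++ [cur[k]] := by
      rw [List.take_add_one]; simp [hkc]
    have htakes : shape.take (k+1) = shape.take k ++ [shape[k]] := by
      rw [List.take_add_one]; simp [hks]
    have hzip : List.zipWith fcell (cur.take (k+1)) (shape.take (k+1))
        = List.zipWith fcell (cur.take k) (shape.take k) ++ [fcell cur[k] shape[k]] := by
      rw [htakec, htakes, List.zipWith_append (by simp; omega)]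
      simp [List.zipWith]
    rw [List.foldl_cons, List.foldl_nil]
    simp only [stepA, hget]
    have hsget : shape[k]? = some shape[k] := List.getElem?_eq_getElem hks
    rw [hsget, hzip, hdrop]
    cases hcv : cur[k] with
    | none => simp [fcell]
    | some v =>
      by_cases hx : shape[k] = some v
      · simp [hx, fcell]
      · simp only [hx, fcell]
        rw [if_pos hx, List.set_append_right _ _ (by omega), hlen, Nat.sub_self,
          List.set_cons_zero]
        simp

theorem mergeRowA_eq_zipWith (cur shape : List (Option Int)) (hl : cur.length = shape.length) :
    mergeRowA cur shape = List.zipWith fcell cur shape := by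
  unfold mergeRowA
  rw [mergeRowA_prefix cur shape hl shape.length le_rfl]
  simp [← hl, List.take_of_length_le hl.ge]

theorem zipWith_fcell_self (c : List (Option Int)) : List.zipWith fcell c c = c := by
  induction c with
  | nil => rfl
  | cons a t ih =>
    rw [List.zipWith_cons_cons, ih]
    cases a <;> simp [fcell]

-- running fold of fcell over a column = "first value iff whole column agrees"
theorem foldl_fcell (tail : List (Option Int)) (c0 : Option Int) :
    tail.foldl fcell c0 = if tail.all (fun x => x = c0) then c0 else none := by
  induction tail generalizing c0 with
  | nil => simp
  | cons x xs ih =>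
    rw [List.foldl_cons, ih]
    cases c0 with
    | none => simp [fcell]
    | some v =>
      by_cases hx : x = some v
      · simp [hx, fcell]
      · simp [fcell, hx]

-- the outer row fold, done pointwise per dimension
theorem foldl_zipWith_cols (t : List (List (Option Int))) :
    ∀ (c : List (Option Int)), (∀ s ∈ t, s.length = c.length) →
    t.foldl (fun c s => List.zipWith fcell c s) c
      = (List.range c.length).map (fun i =>
          (t.map (fun s => s.getD i none)).foldl fcell (c.getD i none)) := by
  induction t with
  | nil =>
    intro c _
    apply List.ext_getElem
    · simp
    · intro i h1 h2
      simp [List.getD_eq_getElem?_getD,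
        List.getElem?_eq_getElem (show i < c.length by simpa using h1)]
  | cons s t ih =>
    intro c hlen
    have hs : s.length = c.length := hlen s (by simp)
    have hzl : (List.zipWith fcell c s).length = c.length := by simp [List.length_zipWith]; omega
    rw [List.foldl_cons, ih (List.zipWith fcell c s)
      (fun r hr => by rw [hzl]; exact hlen r (by simp [hr])), hzl]
    apply List.map_congr_left
    intro i hi
    have hi' : i < c.length := List.mem_range.mp hi
    have : (List.zipWith fcell c s).getD i none = fcell (c.getD i none) (s.getD i none) := by
      simp [List.getD_eq_getElem?_getD, hi', hs ▸ hi', List.getElem_zipWith]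
    rw [this]
    simp

theorem make_info_py_rows (h : List (Option Int)) (t : List (List (Option Int))) (nc : Int)
    (hlen : ∀ s ∈ h :: t, s.length = h.length) :
    make_info_py (h :: t) nc = make_info_py_alt (h :: t) nc := by
  have hstep : ∀ (c : List (Option Int)) (rows : List (List (Option Int))),
      (∀ s ∈ rows, s.length = c.length) →
      rows.foldl (fun c shape => mergeRowA c shape) c
        = rows.foldl (fun c s => List.zipWith fcell c s) c := by
    intro c rows
    induction rows generalizing c with
    | nil => intro _; rfl
    | cons s rs ih =>
      intro hr
      have hs : s.length = c.length := hr s (by simp)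
      have hzl : (List.zipWith fcell c s).length = c.length := by simp [List.length_zipWith]; omega
      rw [List.foldl_cons, List.foldl_cons, mergeRowA_eq_zipWith c s hs.symm]
      exact ih _ (fun r h2 => by rw [hzl]; exact hr r (by simp [h2]))
  unfold make_info_py make_info_py_alt
  simp only [List.headI]
  rw [hstep h (h :: t) (fun s hs => hlen s hs)]
  rw [List.foldl_cons, zipWith_fcell_self]
  rw [foldl_zipWith_cols t h (fun s hs => by
    rw [hlen s (by simp [hs])] )]
  simp only [Prod.mk.injEq, and_true]
  apply List.map_congr_left
  intro i hi
  rw [foldl_fcell]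
  simp only [colB, List.map_cons, List.all_cons]
  simp

-- ===== VERDICT (by name: the statement is the Claim_ definition above) =====
theorem make_info_py_spec : Claim_equal_make_info_py := by
  intro shape_list num_classes _ hpre
  obtain ⟨hne, hlen⟩ := hpre
  unfold Spec_make_info_py
  cases shape_list with
  | nil => exact absurd rfl hne
  | cons h t => exact make_info_py_rows h t num_classes (by simpa using hlen)
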